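-- pv_equiv track=rewrite | github.com/HyunjunKim1/OnlineJudge | OnlineJudge_py/Programmers/유연근무제.py | solution
-- ===== SOURCE A (Python) =====
-- def convertTime(n):
--     h = n // 60
--     m = n % 100
--
--     return h * 60 + m
--
-- def solution(schedules, timelogs, startday):
--     answer = 0
--
--     for i in range(len(schedules)):
--         s = startday
--         schedule = convertTime(schedules[i])
--
--         for time in timelogs[i]:
--             if s == 6 or s == 7:
--                 s += 1
--                 if s==8:
--                     s = 1
--                 continue
--             t = convertTime(time)
--             if schedule + 10 < t:
--                 break
--             else:
--                 s += 1
--         else: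
--             answer += 1
--
--     return answer
-- ===== SOURCE B (Python) =====
-- def convertTime(n):
--     h = n // 60
--     m = n % 100
--     return h * 60 + m
--
-- def solution(schedules, timelogs, startday):
--     # Build the calendar once: one weekend flag per day, for as many days as the
--     # longest timelog needs.  The day counter starts at startday and rolls over
--     # to Monday (1) after Sunday (7).
--     horizon = max((len(logs) for logs in timelogs), default=0)
--     weekend = []
--     d = startday
--     for _ in range(horizon):
--         weekend.append(d == 6 or d == 7)
--         d = 1 if d == 7 else d + 1
--     # A worker is punctual when the latest weekday clock-in is within the limit.
--     answer = 0
--     for sch, logs in zip(schedules, timelogs):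
--         worst = max((convertTime(t) for t, wk in zip(logs, weekend) if not wk),
--                     default=None)
--         if worst is None or worst <= convertTime(sch) + 10:
--             answer += 1
--     return answer
-- ===== Notes on version B (the rewrite author's own statement) =====
-- stated objective: alternative
-- what changed: B precomputes the weekend calendar once as a table (the day counter rolls over to Monday after Sunday) and, per worker, takes the max clock-in over the weekday entries of a zip and compares it once against the schedule limit, replacing A's per-worker mutable day-counter scan with continue/break/for-else; Pre_ excludes timelogs shorter than schedules, where A raises IndexError.
import Mathlib
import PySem

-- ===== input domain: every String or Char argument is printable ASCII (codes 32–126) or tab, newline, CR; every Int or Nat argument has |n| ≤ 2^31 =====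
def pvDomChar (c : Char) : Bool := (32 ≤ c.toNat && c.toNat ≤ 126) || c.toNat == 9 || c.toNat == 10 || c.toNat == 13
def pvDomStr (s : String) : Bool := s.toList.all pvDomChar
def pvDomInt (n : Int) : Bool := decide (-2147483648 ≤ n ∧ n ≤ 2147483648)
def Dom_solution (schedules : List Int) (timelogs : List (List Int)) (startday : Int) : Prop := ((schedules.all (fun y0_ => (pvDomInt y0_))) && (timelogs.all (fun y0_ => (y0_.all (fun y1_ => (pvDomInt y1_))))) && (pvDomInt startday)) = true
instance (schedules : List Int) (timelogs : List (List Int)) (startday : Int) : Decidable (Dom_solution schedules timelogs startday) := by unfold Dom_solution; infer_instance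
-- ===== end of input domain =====

-- B precomputes the weekend calendar once as a table and, per worker, compares the max
-- weekday clock-in against the limit, instead of A's per-worker day-counter scan with
-- continue/break/for-else; objective: alternative.

-- ===== PORT A =====
def convertTimeL (n : Int) : Int :=
  PySem.Int.floordiv n 60 * 60 + PySem.Int.mod n 100

-- inner `for time in timelogs[i] … else:` loop; result = True iff no break
def pvInnerA : List Int → Int → Int → Bool
  | [], _, _ => true
  | time :: rest, s, schedule =>
    if s = 6 ∨ s = 7 then
      let s1 := s + 1
      let s2 := if s1 = 8 then 1 else s1
      pvInnerA rest s2 schedule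
    else
      let t := convertTimeL time
      if schedule + 10 < t then false
      else pvInnerA rest (s + 1) schedule

def solution (schedules : List Int) (timelogs : List (List Int)) (startday : Int) : Int :=
  (PySem.List.pyRange 0 schedules.length 1).foldl
    (fun answer i =>
      let schedule := convertTimeL (PySem.List.pyGetD schedules i 0)
      if pvInnerA (PySem.List.pyGetD timelogs i []) startday schedule then answer + 1
      else answer) 0

-- ===== PORT B =====
-- Source B's calendar loop: one weekend flag per day; the counter rolls over to 1 after 7
def pvCalendar : Nat → Int → List Bool
  | 0, _ => []
  | n + 1, d => (decide (d = 6) || decide (d = 7)) :: pvCalendar n (if d = 7 then 1 else d + 1)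

def solution_alt (schedules : List Int) (timelogs : List (List Int)) (startday : Int) : Int :=
  let horizon := PySem.List.maxD (timelogs.map (fun logs => (logs.length : Int))) (fun y => y) 0
  let weekend := pvCalendar horizon.toNat startday
  (schedules.zip timelogs).foldl
    (fun answer p =>
      let worst := PySem.List.max?
        (((p.2.zip weekend).filter (fun q => !q.2)).map (fun q => convertTimeL q.1))
        (fun y => y)
      match worst with
      | none => answer + 1
      | some w => if w ≤ convertTimeL p.1 + 10 then answer + 1 else answer) 0

-- ===== PRECONDITION & SPEC =====
-- Pre_ excludes exactly the inputs where A raises IndexError: timelogs shorter than schedules.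
def Pre_solution (schedules : List Int) (timelogs : List (List Int)) (startday : Int) : Prop :=
  schedules.length ≤ timelogs.length
instance (schedules : List Int) (timelogs : List (List Int)) (startday : Int) : Decidable (Pre_solution schedules timelogs startday) := by unfold Pre_solution; infer_instance

def pvWitness_solution : List Int × List (List Int) × Int :=
  ([600, 540], [[610, 600], [560, 1000]], 5)

def Spec_solution (schedules : List Int) (timelogs : List (List Int)) (startday : Int) (out : Int) : Prop := out = solution_alt schedules timelogs startday
instance (schedules : List Int) (timelogs : List (List Int)) (startday : Int) (out : Int) : Decidable (Spec_solution schedules timelogs startday out) := by unfold Spec_solution; infer_instance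

-- ===== CLAIM (what is proved, stated in full; the proofs are below) =====
def Claim_equal_solution : Prop := ∀ (schedules : List Int) (timelogs : List (List Int)) (startday : Int), Dom_solution schedules timelogs startday → Pre_solution schedules timelogs startday → Spec_solution schedules timelogs startday (solution schedules timelogs startday)

-- ===== LEMMAS AND PROOFS =====

-- A's inner loop = "every entry is a weekend day or on time", read off the calendar
theorem pvInnerA_eq_all (schedule : Int) (times : List Int) :
    ∀ (n : Nat) (s : Int), times.length ≤ n →
      pvInnerA times s schedule =
        (times.zip (pvCalendar n s)).all
          (fun q => q.2 || decide (convertTimeL q.1 ≤ schedule + 10)) := by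
  induction times with
  | nil => intro n s _; simp [pvInnerA]
  | cons t rest ih =>
    intro n s hn
    cases n with
    | zero => simp at hn
    | succ m =>
      simp only [pvCalendar, List.zip_cons_cons, List.all_cons]
      by_cases hw : s = 6 ∨ s = 7
      · have hflag : (decide (s = 6) || decide (s = 7)) = true := by
          rcases hw with h | h <;> simp [h]
        have hA : pvInnerA (t :: rest) s schedule =
            pvInnerA rest (if s = 7 then 1 else s + 1) schedule := by
          simp only [pvInnerA, if_pos hw]
          congr 1
          split_ifs <;> omega
        rw [hA, hflag, ih m _ (by simpa using hn)]
        simp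
      · have hflag : (decide (s = 6) || decide (s = 7)) = false := by
          simp only [Bool.or_eq_false_iff, decide_eq_false_iff_not]
          exact ⟨fun h => hw (Or.inl h), fun h => hw (Or.inr h)⟩
        have hstep : (if s = 7 then 1 else s + 1) = s + 1 := by
          rw [if_neg (fun h => hw (Or.inr h))]
        rw [hflag, hstep]
        simp only [Bool.false_or]
        by_cases hl : schedule + 10 < convertTimeL t
        · have hA : pvInnerA (t :: rest) s schedule = false := by
            simp only [pvInnerA, if_neg hw, if_pos hl]
          rw [hA]
          have hd : decide (convertTimeL t ≤ schedule + 10) = false := by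
            simp only [decide_eq_false_iff_not]; omega
          rw [hd]; simp
        · have hA : pvInnerA (t :: rest) s schedule = pvInnerA rest (s + 1) schedule := by
            simp only [pvInnerA, if_neg hw, if_neg hl]
          rw [hA, ih m _ (by simpa using hn)]
          have hd : decide (convertTimeL t ≤ schedule + 10) = true := by
            simp only [decide_eq_true_eq]; omega
          rw [hd]; simp

-- "every entry is flagged or on time" = "every unflagged entry is on time"
theorem pvAll_or_filter {α : Type} (l : List α) (p r : α → Bool) :
    l.all (fun q => p q || r q) = (l.filter (fun q => !(p q))).all r := by
  induction l with
  | nil => simp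
  | cons x xs ih =>
    simp only [List.all_cons, List.filter_cons]
    cases hpx : p x <;> simp_all

-- all(on-time) expressed through max with default None
theorem pvAll_eq_max (vals : List Int) (L : Int) :
    vals.all (fun v => decide (v ≤ L)) =
      (match PySem.List.max? vals (fun y => y) with
       | none => true
       | some w => decide (w ≤ L)) := by
  cases h : PySem.List.max? vals (fun y => y) with
  | none =>
    rw [PySem.List.max?_eq_none_iff] at h
    subst h; simp
  | some w =>
    have hmem := PySem.List.max?_mem h
    have hmax := PySem.List.max?_isMax h
    rw [show ∀ a b : Bool, a = b ↔ (a = true ↔ b = true) from by decide]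
    simp only [List.all_eq_true, decide_eq_true_eq]
    constructor
    · intro hall; exact hall w hmem
    · intro hw y hy; exact le_trans (hmax y hy) hw

theorem pvZip_eq_map (schedules : List Int) (timelogs : List (List Int))
    (hlen : schedules.length ≤ timelogs.length) :
    schedules.zip timelogs =
      (PySem.List.pyRange 0 schedules.length 1).map
        (fun i => (PySem.List.pyGetD schedules i 0, PySem.List.pyGetD timelogs i [])) := by
  rw [PySem.List.pyRange_zero_natCast, List.map_map]
  apply List.ext_getElem
  · simp [List.length_zip]; omega
  · intro k hk1 hk2
    have hks : k < schedules.length := by simp [List.length_zip] at hk1; omega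
    have hkt : k < timelogs.length := by omega
    simp only [List.getElem_zip, List.getElem_map, List.getElem_range, Function.comp]
    rw [PySem.List.pyGetD_natCast, PySem.List.pyGetD_natCast,
        List.getD_eq_getElem _ _ hks, List.getD_eq_getElem _ _ hkt]

theorem solution_eq_alt (schedules : List Int) (timelogs : List (List Int)) (startday : Int)
    (hlen : schedules.length ≤ timelogs.length) :
    solution schedules timelogs startday = solution_alt schedules timelogs startday := by
  unfold solution solution_alt
  rw [pvZip_eq_map schedules timelogs hlen, List.foldl_map]
  apply PySem.List.foldl_congr_mem
  intro acc i hi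
  dsimp only
  -- the fetched timelog fits under the calendar horizon
  have hin : 0 ≤ i ∧ i < (schedules.length : Int) := by
    have := PySem.List.mem_pyRange_one.mp hi
    omega
  have hmemlog : PySem.List.pyGetD timelogs i [] ∈ timelogs := by
    have hlt : i.toNat < timelogs.length := by omega
    rw [PySem.List.pyGetD_of_nonneg (h := hin.1), List.getD_eq_getElem _ _ hlt]
    exact List.getElem_mem hlt
  have hbound : ((PySem.List.pyGetD timelogs i []).length : Int) ≤
      PySem.List.maxD (timelogs.map (fun logs => (logs.length : Int))) (fun y => y) 0 := by
    exact PySem.List.le_maxD_id _ 0 _ (List.mem_map_of_mem hmemlog)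
  have hn : (PySem.List.pyGetD timelogs i []).length ≤
      (PySem.List.maxD (timelogs.map (fun logs => (logs.length : Int))) (fun y => y) 0).toNat := by
    omega
  rw [pvInnerA_eq_all _ _ _ startday hn, pvAll_or_filter,
      show ∀ (l : List (Int × Bool)),
        l.all (fun q => decide (convertTimeL q.1 ≤
            convertTimeL (PySem.List.pyGetD schedules i 0) + 10)) =
        (l.map (fun q => convertTimeL q.1)).all
          (fun v => decide (v ≤ convertTimeL (PySem.List.pyGetD schedules i 0) + 10)) from
      fun l => by rw [List.all_map]; rfl,
      pvAll_eq_max]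
  cases PySem.List.max?
      ((((PySem.List.pyGetD timelogs i []).zip
          (pvCalendar (PySem.List.maxD (timelogs.map (fun logs => (logs.length : Int)))
              (fun y => y) 0).toNat startday)).filter (fun q => !q.2)).map
        (fun q => convertTimeL q.1)) (fun y => y) with
  | none => rfl
  | some w => by_cases hw : w ≤ convertTimeL (PySem.List.pyGetD schedules i 0) + 10 <;> simp [hw]

-- ===== VERDICT (by name: the statement is the Claim_ definition above) =====
theorem solution_spec : Claim_equal_solution := by
  intro schedules timelogs startday _ hpre
  unfold Spec_solution
  exact solution_eq_alt schedules timelogs startday hpre
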